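-- pv_equiv track=rewrite | github.com/vinay9986/CommonLit | scripts/gibbs_motifs.py | findIdealMotifFromCountMatrix
-- ===== SOURCE A (Python) =====
-- def findIdealMotifFromCountMatrix(countMatrix, k, nucleotides):
--     idealMotif = ''
--     for i in range(k):
--         maxValue = -999
--         idealNucleotide = ''
--         for nucleotide in nucleotides:
--             if maxValue < countMatrix[nucleotide][i]:
--                 maxValue = countMatrix[nucleotide][i]
--                 idealNucleotide = nucleotide
--         idealMotif += idealNucleotide
--     return idealMotif
-- ===== SOURCE B (Python) =====
-- def findIdealMotifFromCountMatrix(countMatrix, k, nucleotides):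
--     # Transposed accumulation: one pass over the count matrix rows (nucleotides),
--     # maintaining per-column (bestValue, bestNucleotide) pairs; strict '<' keeps
--     # A's first-nucleotide-wins tie-breaking.
--     if k <= 0:
--         return ''
--     best = [(-999, '')] * k
--     for nucleotide in nucleotides:
--         row = countMatrix[nucleotide]
--         best = [(v, nucleotide) if bv < v else (bv, bn)
--                 for (bv, bn), v in zip(best, row)]
--     return ''.join(bn for _, bn in best)
-- ===== Notes on version B (the rewrite author's own statement) =====
-- stated objective: alternative
-- what changed: Replaces A's column-major scan (for each column, rescan all nucleotides) by a row-major single pass over the count-matrix rows that maintains per-column (bestValue, bestNucleotide) pairs and joins them at the end.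
import Mathlib
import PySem

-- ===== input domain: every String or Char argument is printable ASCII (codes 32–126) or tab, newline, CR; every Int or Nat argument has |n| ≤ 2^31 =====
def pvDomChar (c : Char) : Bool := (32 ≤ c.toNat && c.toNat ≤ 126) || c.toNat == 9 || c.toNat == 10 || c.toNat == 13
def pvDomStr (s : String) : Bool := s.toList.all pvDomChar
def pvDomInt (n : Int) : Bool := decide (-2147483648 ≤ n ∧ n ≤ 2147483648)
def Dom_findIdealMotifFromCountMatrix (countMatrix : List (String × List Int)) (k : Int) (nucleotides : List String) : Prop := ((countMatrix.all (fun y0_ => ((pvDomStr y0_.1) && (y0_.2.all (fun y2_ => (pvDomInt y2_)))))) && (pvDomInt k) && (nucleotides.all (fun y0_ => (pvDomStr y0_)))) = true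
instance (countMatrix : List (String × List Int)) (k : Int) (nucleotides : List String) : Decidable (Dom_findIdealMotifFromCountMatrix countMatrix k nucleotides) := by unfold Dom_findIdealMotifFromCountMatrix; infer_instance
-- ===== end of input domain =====

-- B replaces A's column-major scan by a row-major pass keeping per-column (bestValue, bestNucleotide) pairs; same cost, different decomposition.


-- dict lookup countMatrix[nucleotide]: first matching key of the association list (exact for Python dict, whose keys are unique)
def pvLookup (cm : List (String × List Int)) (key : String) : Option (List Int) :=
  (cm.find? (fun q => q.1 == key)).map (·.2)

-- ===== PORT A =====
def findIdealMotifFromCountMatrix (countMatrix : List (String × List Int)) (k : Int) (nucleotides : List String) : String :=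
  (PySem.List.pyRange 0 k 1).foldl (fun idealMotif i =>
    let st := nucleotides.foldl (fun (p : Int × String) nucleotide =>
      match pvLookup countMatrix nucleotide with
      | some row =>
        match PySem.List.pyGet? row i with
        | some v => if p.1 < v then (v, nucleotide) else p
        | none => p          -- IndexError: excluded by Pre_
      | none => p            -- KeyError: excluded by Pre_
      ) ((-999 : Int), "")
    idealMotif ++ st.2) ""

-- ===== PORT B =====
def findIdealMotifFromCountMatrix_alt (countMatrix : List (String × List Int)) (k : Int) (nucleotides : List String) : String :=
  if k ≤ 0 then "" else
  let best := nucleotides.foldl (fun (best : List (Int × String)) nucleotide =>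
      match pvLookup countMatrix nucleotide with
      | some row => (best.zip row).map (fun q => if q.1.1 < q.2 then (q.2, nucleotide) else q.1)
      | none => best         -- KeyError: excluded by Pre_
      ) (List.replicate k.toNat ((-999 : Int), ""))
  String.join (best.map (·.2))

-- ===== PRECONDITION & SPEC =====
-- Pre_ excludes exactly the inputs where A raises: with k > 0, a nucleotide missing from the
-- dict (KeyError) or whose count row is shorter than k (IndexError).
def Pre_findIdealMotifFromCountMatrix (countMatrix : List (String × List Int)) (k : Int) (nucleotides : List String) : Prop :=
  0 < k → ∀ nuc ∈ nucleotides, k ≤ (pvLookup countMatrix nuc).elim (-1) (fun row => (row.length : Int))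
instance (countMatrix : List (String × List Int)) (k : Int) (nucleotides : List String) : Decidable (Pre_findIdealMotifFromCountMatrix countMatrix k nucleotides) := by unfold Pre_findIdealMotifFromCountMatrix; infer_instance

def pvWitness_findIdealMotifFromCountMatrix : (List (String × List Int)) × Int × List String :=
  ([("A", [3, 1]), ("C", [2, 5])], 2, ["A", "C"])

def Spec_findIdealMotifFromCountMatrix (countMatrix : List (String × List Int)) (k : Int) (nucleotides : List String) (out : String) : Prop := out = findIdealMotifFromCountMatrix_alt countMatrix k nucleotides
instance (countMatrix : List (String × List Int)) (k : Int) (nucleotides : List String) (out : String) : Decidable (Spec_findIdealMotifFromCountMatrix countMatrix k nucleotides out) := by unfold Spec_findIdealMotifFromCountMatrix; infer_instance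

-- ===== CLAIM (what is proved, stated in full; the proofs are below) =====
def Claim_equal_findIdealMotifFromCountMatrix : Prop := ∀ (countMatrix : List (String × List Int)) (k : Int) (nucleotides : List String), Dom_findIdealMotifFromCountMatrix countMatrix k nucleotides → Pre_findIdealMotifFromCountMatrix countMatrix k nucleotides → Spec_findIdealMotifFromCountMatrix countMatrix k nucleotides (findIdealMotifFromCountMatrix countMatrix k nucleotides)

-- ===== LEMMAS AND PROOFS =====

-- canonical per-column fold both ports are reduced to
def pvColStep (cm : List (String × List Int)) (i : Nat) (p : Int × String) (nuc : String) : Int × String :=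
  match pvLookup cm nuc with
  | some row => if p.1 < row.getD i 0 then (row.getD i 0, nuc) else p
  | none => p

def pvColFold (cm : List (String × List Int)) (nucs : List String) (i : Nat) : Int × String :=
  nucs.foldl (pvColStep cm i) ((-999 : Int), "")

-- string-building loop = join of the per-column strings
theorem pv_foldl_append_shift (l : List String) (b : String) :
    l.foldl (· ++ ·) b = b ++ l.foldl (· ++ ·) "" := by
  induction l generalizing b with
  | nil => simp
  | cons y ys ih =>
      simp only [List.foldl_cons]
      rw [ih (b ++ y), ih ("" ++ y)]
      simp [String.append_assoc]

theorem pv_join_cons (y : String) (l : List String) :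
    String.join (y :: l) = y ++ String.join l := by
  simp only [String.join, List.foldl_cons]
  rw [pv_foldl_append_shift]
  simp

theorem pv_strfold (f : Int → String) (l : List Int) (a : String) :
    l.foldl (fun s x => s ++ f x) a = a ++ String.join (l.map f) := by
  induction l generalizing a with
  | nil => simp [String.join]
  | cons x xs ih =>
      simp only [List.foldl_cons, List.map_cons, ih, pv_join_cons]
      simp [String.append_assoc]

-- A's side: the whole program is the join of the canonical column folds
theorem pvA_eq (cm : List (String × List Int)) (k : Int) (nucs : List String)
    (hpre : Pre_findIdealMotifFromCountMatrix cm k nucs) (hk : 0 < k) :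
    findIdealMotifFromCountMatrix cm k nucs
      = String.join ((List.range k.toNat).map (fun i => (pvColFold cm nucs i).2)) := by
  unfold findIdealMotifFromCountMatrix
  rw [PySem.List.pyRange_one, pv_strfold]
  rw [List.map_map, sub_zero]
  have hmap : ∀ i ∈ List.range k.toNat,
      ((fun i => (nucs.foldl (fun (p : Int × String) nucleotide =>
          match pvLookup cm nucleotide with
          | some row =>
            match PySem.List.pyGet? row i with
            | some v => if p.1 < v then (v, nucleotide) else p
            | none => p
          | none => p) ((-999 : Int), "")).2) ∘ (fun j : Nat => (0 : Int) + j)) i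
        = (fun i => (pvColFold cm nucs i).2) i := by
    intro j hj
    rw [List.mem_range] at hj
    simp only [Function.comp_apply, zero_add]
    apply congrArg
    unfold pvColFold
    apply PySem.List.foldl_congr_mem
    intro p nuc hnuc
    have h := hpre hk nuc hnuc
    unfold pvColStep
    cases hrow : pvLookup cm nuc with
    | none => simp
    | some row =>
        rw [hrow] at h
        simp only [Option.elim] at h
        have hlen : j < row.length := by omega
        simp [PySem.List.pyGet?_natCast, List.getElem?_eq_getElem hlen,
              List.getD_eq_getElem?_getD]
  rw [List.map_congr_left hmap]
  simp

-- row-major fold acting pointwise on a column-indexed table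
theorem pvB_fold (cm : List (String × List Int)) (nucs : List String) (n : Nat)
    (h : ∀ nuc ∈ nucs, ∀ row, pvLookup cm nuc = some row → n ≤ row.length)
    (g : Nat → Int × String) :
    nucs.foldl (fun (best : List (Int × String)) nucleotide =>
        match pvLookup cm nucleotide with
        | some row => (best.zip row).map (fun q => if q.1.1 < q.2 then (q.2, nucleotide) else q.1)
        | none => best) ((List.range n).map g)
      = (List.range n).map (fun i => nucs.foldl (pvColStep cm i) (g i)) := by
  induction nucs generalizing g with
  | nil => simp
  | cons nuc rest ih =>
      simp only [List.foldl_cons]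
      have hstep :
          (match pvLookup cm nuc with
            | some row => (((List.range n).map g).zip row).map
                (fun q => if q.1.1 < q.2 then (q.2, nuc) else q.1)
            | none => (List.range n).map g)
          = (List.range n).map (fun i => pvColStep cm i (g i) nuc) := by
        cases hrow : pvLookup cm nuc with
        | none => simp [pvColStep, hrow]
        | some row =>
            have hlen : n ≤ row.length := h nuc (by simp) row hrow
            apply List.ext_getElem
            · simp [Nat.min_eq_left hlen]
            · intro i h1 h2
              have hi : i < n := by simpa using h2
              have hir : i < row.length := lt_of_lt_of_le hi hlen
              simp [pvColStep, hrow, List.getD_eq_getElem?_getD, List.getElem?_eq_getElem hir]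
      rw [hstep, ih (fun x hx => h x (by simp [hx]))]

-- B's side: the whole program is the join of the canonical column folds
theorem pvB_eq (cm : List (String × List Int)) (k : Int) (nucs : List String)
    (hpre : Pre_findIdealMotifFromCountMatrix cm k nucs) (hk : 0 < k) :
    findIdealMotifFromCountMatrix_alt cm k nucs
      = String.join ((List.range k.toNat).map (fun i => (pvColFold cm nucs i).2)) := by
  unfold findIdealMotifFromCountMatrix_alt
  rw [if_neg (by omega)]
  have hrepl : List.replicate k.toNat ((-999 : Int), "") =
      (List.range k.toNat).map (fun _ => ((-999 : Int), "")) := by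
    simp [List.map_const']
  rw [hrepl, pvB_fold cm nucs k.toNat
        (fun nuc hnuc row hrow => by
          have h := hpre hk nuc hnuc
          rw [hrow] at h; simp only [Option.elim] at h; omega)]
  simp [pvColFold, List.map_map, Function.comp_def]

-- ===== VERDICT (by name: the statement is the Claim_ definition above) =====
theorem findIdealMotifFromCountMatrix_spec : Claim_equal_findIdealMotifFromCountMatrix := by
  intro cm k nucs _ hpre
  unfold Spec_findIdealMotifFromCountMatrix
  by_cases hk : 0 < k
  · rw [pvA_eq cm k nucs hpre hk, pvB_eq cm k nucs hpre hk]
  · unfold findIdealMotifFromCountMatrix findIdealMotifFromCountMatrix_alt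
    rw [PySem.List.pyRange_one_eq_nil (by omega), if_pos (by omega)]
    rfl
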